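-- pv_equiv track=rewrite | github.com/LexHarie/coding_practice | Coding Exam/Percolation.py | percolation
-- ===== SOURCE A (Python) =====
-- def percolation(string):
--     if string == "1":
--         return "Yes"
--     elif string == "0":
--         return "No"
--     number_of_rows = 0
--     for i in range(len(string)):
--         array = []
--         if string[i] == ";":
--             number_of_rows += 1
--         for i in range(number_of_rows):
--             array.append([])
--
--     list = []
--     new_array = []
--     for i in range(len(string)):
--         if string[i] == '1':
--             list.append(int(string[i]))
--         elif string[i] == '0':
--             list.append(int(string[i]))
--
--     for i in range(0, len(list), 5):
--         new_array.append(list[i : i + 5])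
--
--
--     position = 0
--     new_position = 0
--     list = []
--     for i in range(len(new_array)):
--         for x in range(len(new_array[i])):
--             if new_array[i][x] == 1:
--                 position = x
--                 list.append(position)
--     yes = ''
--
--     look = [1, 0 , -1]
--     no_list = []
--
--     for i in range(len(list) - 1):
--         if (list[i + 1] - list[i]) in look:
--             no_list.append('yes')
--         else:
--             no_list.append('no')
--
--     if 'no' in no_list:
--         return "No"
--     else:
--         return "Yes"
-- ===== SOURCE B (Python) =====
-- def percolation(string):
--     if string == "1":
--         return "Yes"
--     elif string == "0":
--         return "No"
--     positions = []
--     count = 0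
--     for ch in string:
--         if ch == '0' or ch == '1':
--             if ch == '1':
--                 positions.append(count % 5)
--             count += 1
--     for a, b in zip(positions, positions[1:]):
--         if abs(b - a) > 1:
--             return "No"
--     return "Yes"
-- ===== Notes on version B (the rewrite author's own statement) =====
-- stated objective: simpler
-- what changed: B replaces A's pipeline (collect the binary digits into a list, chunk that list into rows of five, rescan every row for the in-row index of each set cell, then build a yes/no string list and test membership) by a single pass over the string that records each set cell's column directly as the running digit count mod five and then checks adjacent gaps; A's dead separator-counting loop disappears.
import Mathlib
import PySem

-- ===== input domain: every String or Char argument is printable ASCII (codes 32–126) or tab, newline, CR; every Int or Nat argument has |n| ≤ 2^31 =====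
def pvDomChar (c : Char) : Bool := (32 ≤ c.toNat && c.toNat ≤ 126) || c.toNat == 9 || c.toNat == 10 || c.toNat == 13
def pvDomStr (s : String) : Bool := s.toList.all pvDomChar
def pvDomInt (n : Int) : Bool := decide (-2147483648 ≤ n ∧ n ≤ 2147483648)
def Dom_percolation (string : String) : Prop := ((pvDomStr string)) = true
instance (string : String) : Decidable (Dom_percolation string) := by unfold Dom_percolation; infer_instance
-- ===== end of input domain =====

-- B replaces A's build-digit-list / chunk-into-rows-of-5 / per-row index scan pipeline by one
-- pass over the string collecting each '1'-column as count % 5; objective: simpler.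

-- ===== PORT A =====
def percolation (string : String) : String :=
  if string == "1" then "Yes"
  else if string == "0" then "No"
  else
    let cs := string.toList
    -- first loop: builds the (discarded) `array` and counts ';' into number_of_rows, which is never read
    let _numberOfRows : Int := (PySem.List.pyRange 0 (PySem.List.len cs) 1).foldl
      (fun n i => if PySem.List.pyGetD cs i ' ' == ';' then n + 1 else n) 0
    let lst : List Int := (PySem.List.pyRange 0 (PySem.List.len cs) 1).foldl
      (fun l i => if PySem.List.pyGetD cs i ' ' == '1' then l ++ [(1 : Int)]
                  else if PySem.List.pyGetD cs i ' ' == '0' then l ++ [(0 : Int)] else l) []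
    let newArray : List (List Int) := (PySem.List.pyRange 0 (PySem.List.len lst) 5).foldl
      (fun na i => na ++ [PySem.List.slice lst (some i) (some (i + 5))]) []
    let positions : List Int := (PySem.List.pyRange 0 (PySem.List.len newArray) 1).foldl
      (fun l i =>
        (PySem.List.pyRange 0 (PySem.List.len (PySem.List.pyGetD newArray i [])) 1).foldl
          (fun l x => if PySem.List.pyGetD (PySem.List.pyGetD newArray i []) x 0 == 1
                      then l ++ [x] else l) l) []
    let look : List Int := [1, 0, -1]
    let noList : List String := (PySem.List.pyRange 0 (PySem.List.len positions - 1) 1).foldl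
      (fun nl i => if (PySem.List.pyGetD positions (i + 1) 0 - PySem.List.pyGetD positions i 0) ∈ look
                   then nl ++ ["yes"] else nl ++ ["no"]) []
    if "no" ∈ noList then "No" else "Yes"

-- ===== PORT B =====
def percolation_alt (string : String) : String :=
  if string == "1" then "Yes"
  else if string == "0" then "No"
  else
    let st : List Int × Nat := string.toList.foldl (fun st ch =>
      if ch == '0' || ch == '1' then
        ((if ch == '1' then st.1 ++ [((st.2 % 5 : Nat) : Int)] else st.1), st.2 + 1)
      else st) ([], 0)
    let positions := st.1
    if (positions.zip positions.tail).any (fun p => decide (1 < (p.2 - p.1).natAbs))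
    then "No" else "Yes"

-- ===== PRECONDITION & SPEC =====
def Spec_percolation (string : String) (out : String) : Prop := out = percolation_alt string
instance (string : String) (out : String) : Decidable (Spec_percolation string out) := by unfold Spec_percolation; infer_instance

-- ===== CLAIM (what is proved, stated in full; the proofs are below) =====
def Claim_equal_percolation : Prop := ∀ (string : String), Dom_percolation string → Spec_percolation string (percolation string)

-- ===== LEMMAS AND PROOFS =====

-- digits of the string, as A's first collecting loop produces them
def pvDigits : List Char → List Int
  | [] => []
  | c :: cs => (if c == '1' then [(1 : Int)] else if c == '0' then [(0 : Int)] else []) ++ pvDigits cs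

-- B's positions: column (counter mod 5) of each 1, counter starting at n
def pvP : List Int → Nat → List Int
  | [], _ => []
  | d :: ds, n => (if d == 1 then [((n % 5 : Nat) : Int)] else []) ++ pvP ds (n + 1)

-- absolute index of each 1, counter starting at n (what A's per-row scan produces)
def pvQ : List Int → Nat → List Int
  | [], _ => []
  | d :: ds, n => (if d == 1 then [(n : Int)] else []) ++ pvQ ds (n + 1)

-- adjacent-gap check
def pvChk : List Int → Bool
  | a :: b :: t => decide (1 < (b - a).natAbs) || pvChk (b :: t)
  | _ => false

theorem pv_digits_fold (cs : List Char) : ∀ l : List Int,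
    cs.foldl (fun l c => if c == '1' then l ++ [(1 : Int)]
              else if c == '0' then l ++ [(0 : Int)] else l) l = l ++ pvDigits cs := by
  induction cs with
  | nil => intro l; simp [pvDigits]
  | cons c cs ih =>
    intro l
    rw [List.foldl_cons, ih]
    by_cases h1 : c == '1'
    · simp [pvDigits, h1]
    · by_cases h0 : c == '0' <;> simp [pvDigits, h1, h0]

theorem pv_b_fold (cs : List Char) : ∀ (pos : List Int) (n : Nat),
    cs.foldl (fun st ch =>
      if ch == '0' || ch == '1' then
        ((if ch == '1' then st.1 ++ [((st.2 % 5 : Nat) : Int)] else st.1), st.2 + 1)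
      else st) (pos, n) = (pos ++ pvP (pvDigits cs) n, n + (pvDigits cs).length) := by
  induction cs with
  | nil => intro pos n; simp [pvDigits, pvP]
  | cons c cs ih =>
    intro pos n
    rw [List.foldl_cons]
    by_cases h1 : c == '1'
    · rw [show (if (c == '0' || c == '1') = true then
          ((if (c == '1') = true then pos ++ [((n % 5 : Nat) : Int)] else pos), n + 1)
          else (pos, n)) = (pos ++ [((n % 5 : Nat) : Int)], n + 1) by simp [h1], ih]
      simp [pvDigits, pvP, h1, Prod.ext_iff]
      omega
    · by_cases h0 : c == '0'
      · rw [show (if (c == '0' || c == '1') = true then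
            ((if (c == '1') = true then pos ++ [((n % 5 : Nat) : Int)] else pos), n + 1)
            else (pos, n)) = (pos, n + 1) by simp [h0, h1], ih]
        simp [pvDigits, pvP, h1, h0, Prod.ext_iff]
        omega
      · rw [show (if (c == '0' || c == '1') = true then
            ((if (c == '1') = true then pos ++ [((n % 5 : Nat) : Int)] else pos), n + 1)
            else (pos, n)) = (pos, n) by simp [h0, h1], ih]
        simp [pvDigits, h1, h0]

theorem pvP_shift (l : List Int) : ∀ n, pvP l (n + 5) = pvP l n := by
  induction l with
  | nil => intro n; simp [pvP]
  | cons d ds ih =>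
    intro n
    simp only [pvP, Nat.add_mod_right]
    rw [show n + 5 + 1 = n + 1 + 5 by omega, ih]

theorem pvP_append (l1 l2 : List Int) : ∀ n, pvP (l1 ++ l2) n = pvP l1 n ++ pvP l2 (n + l1.length) := by
  induction l1 generalizing l2 with
  | nil => intro n; simp [pvP]
  | cons d ds ih =>
    intro n
    simp only [List.cons_append, pvP, ih, List.length_cons]
    rw [show n + 1 + ds.length = n + (ds.length + 1) by omega]
    simp [List.append_assoc]

theorem pvQ_eq_pvP (l : List Int) : ∀ n, n + l.length ≤ 5 → pvQ l n = pvP l n := by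
  induction l with
  | nil => intro n _; simp [pvQ, pvP]
  | cons d ds ih =>
    intro n h
    simp only [List.length_cons] at h
    simp only [pvQ, pvP, ih (n + 1) (by omega), Nat.mod_eq_of_lt (show n < 5 by omega)]

theorem pv_row_fold (row : List Int) : ∀ (n : Nat) (l : List Int),
    (PySem.List.enumerate row n).foldl
      (fun l p => if p.2 == (1 : Int) then l ++ [p.1] else l) l = l ++ pvQ row n := by
  induction row with
  | nil => intro n l; simp [PySem.List.enumerate_nil, pvQ]
  | cons d ds ih =>
    intro n l
    rw [PySem.List.enumerate_cons, List.foldl_cons,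
        show ((n : Int) + 1) = ((n + 1 : Nat) : Int) by push_cast; ring, ih]
    by_cases h1 : d == (1 : Int)
    · simp [pvQ, h1]
    · simp [pvQ, h1]

theorem pv_inner (row : List Int) (l : List Int) :
    (PySem.List.pyRange 0 (PySem.List.len row) 1).foldl
      (fun l x => if PySem.List.pyGetD row x 0 == 1 then l ++ [x] else l) l = l ++ pvQ row 0 := by
  have h : (PySem.List.pyRange 0 (PySem.List.len row) 1).foldl
      (fun l x => if PySem.List.pyGetD row x 0 == 1 then l ++ [x] else l) l
      = (PySem.List.enumerate row 0).foldl
        (fun l p => if p.2 == (1 : Int) then l ++ [p.1] else l) l := by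
    rw [PySem.List.enumerate_eq_map_pyRange row (0 : Int), List.foldl_map]
  rw [h]
  simpa using pv_row_fold row 0 l

theorem pv_main : ∀ (N : Nat) (lst : List Int), lst.length = N →
    ((List.range ((((lst.length : Int) + 4) / 5).toNat)).map
      (fun k => (lst.drop (5 * k)).take 5)).flatMap (fun row => pvQ row 0) = pvP lst 0 := by
  intro N
  induction N using Nat.strong_induction_on with
  | _ N ih =>
    intro lst hlen
    by_cases hnil : lst = []
    · subst hnil; simp [pvP]
    · have hpos : 0 < lst.length := List.length_pos_iff.mpr hnil
      have hM : ((((lst.length : Int) + 4) / 5).toNat)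
          = ((((lst.drop 5).length : Int) + 4) / 5).toNat + 1 := by
        simp only [List.length_drop]; omega
      rw [hM, List.range_succ_eq_map, List.map_cons, List.map_map, List.flatMap_cons]
      have hfun : ((fun k => (lst.drop (5 * k)).take 5) ∘ Nat.succ)
          = (fun k => ((lst.drop 5).drop (5 * k)).take 5) := by
        funext k
        simp only [Function.comp_apply, List.drop_drop]
        rw [show 5 * Nat.succ k = 5 + 5 * k by omega]
      rw [hfun]
      have hrec := ih (lst.drop 5).length (by simp; omega) (lst.drop 5) rfl
      rw [hrec]
      conv_rhs => rw [← List.take_append_drop 5 lst]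
      rw [pvP_append]
      have hq : pvQ (lst.take 5) 0 = pvP (lst.take 5) 0 :=
        pvQ_eq_pvP _ 0 (by simp)
      rw [Nat.mul_zero, List.drop_zero, hq]
      by_cases h5 : 5 ≤ lst.length
      · rw [List.length_take, Nat.min_eq_left h5, Nat.zero_add,
            show (5 : Nat) = 0 + 5 by omega, pvP_shift]
      · have hd : lst.drop 5 = [] := List.drop_eq_nil_of_le (by omega)
        simp [hd, pvP]

theorem pv_chk_iff (ps : List Int) : pvChk ps = true ↔
    ∃ k : Nat, k + 1 < ps.length ∧ 1 < (ps.getD (k + 1) 0 - ps.getD k 0).natAbs := by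
  induction ps with
  | nil => simp [pvChk]
  | cons a rest ih =>
    cases rest with
    | nil => simp [pvChk]
    | cons b t =>
      simp only [pvChk, Bool.or_eq_true, decide_eq_true_eq, ih]
      constructor
      · rintro (h | ⟨k, hk, h⟩)
        · exact ⟨0, by simp, by simpa using h⟩
        · exact ⟨k + 1, by simpa using hk, by simpa using h⟩
      · rintro ⟨k, hk, h⟩
        cases k with
        | zero => exact Or.inl (by simpa using h)
        | succ k => exact Or.inr ⟨k, by simpa using hk, by simpa using h⟩

theorem pv_zip_chk (ps : List Int) :
    (ps.zip ps.tail).any (fun p => decide (1 < (p.2 - p.1).natAbs)) = pvChk ps := by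
  induction ps with
  | nil => simp [pvChk]
  | cons a rest ih =>
    cases rest with
    | nil => simp [pvChk]
    | cons b t =>
      simp only [List.tail_cons, List.zip_cons_cons, List.any_cons, pvChk]
      rw [← ih]
      simp

theorem pv_nolist_mem (ps : List Int) :
    ("no" ∈ (PySem.List.pyRange 0 (PySem.List.len ps - 1) 1).foldl
      (fun nl i => if (PySem.List.pyGetD ps (i + 1) 0 - PySem.List.pyGetD ps i 0) ∈ ([1, 0, -1] : List Int)
                   then nl ++ ["yes"] else nl ++ ["no"]) ([] : List String)) ↔ pvChk ps = true := by
  have key : ∀ (is : List Int) (nl : List String),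
      ("no" ∈ is.foldl
        (fun nl i => if (PySem.List.pyGetD ps (i + 1) 0 - PySem.List.pyGetD ps i 0) ∈ ([1, 0, -1] : List Int)
                     then nl ++ ["yes"] else nl ++ ["no"]) nl)
      ↔ ("no" ∈ nl ∨ ∃ i ∈ is,
          ¬ (PySem.List.pyGetD ps (i + 1) 0 - PySem.List.pyGetD ps i 0) ∈ ([1, 0, -1] : List Int)) := by
    intro is
    induction is with
    | nil => intro nl; simp
    | cons i is ihh =>
      intro nl
      rw [List.foldl_cons]
      by_cases h : (PySem.List.pyGetD ps (i + 1) 0 - PySem.List.pyGetD ps i 0) ∈ ([1, 0, -1] : List Int)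
      · rw [if_pos h, ihh]
        simp only [List.mem_cons, List.mem_nil_iff, or_false] at h
        simp only [List.mem_append, List.mem_cons, List.mem_nil_iff, or_false]
        constructor
        · rintro ((hnl | hne) | ⟨j, hj, hP⟩)
          · exact Or.inl hnl
          · exact absurd hne (by decide)
          · exact Or.inr ⟨j, Or.inr hj, hP⟩
        · rintro (hnl | ⟨j, hji | hj, hP⟩)
          · exact Or.inl (Or.inl hnl)
          · subst hji; exact absurd h hP
          · exact Or.inr ⟨j, hj, hP⟩
      · rw [if_neg h, ihh]
        simp only [List.mem_cons, List.mem_nil_iff, or_false] at h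
        simp only [List.mem_append, List.mem_cons, List.mem_nil_iff, or_false]
        constructor
        · rintro ((hnl | _) | ⟨j, hj, hP⟩)
          · exact Or.inl hnl
          · exact Or.inr ⟨i, Or.inl rfl, h⟩
          · exact Or.inr ⟨j, Or.inr hj, hP⟩
        · rintro _
          exact Or.inl (Or.inr trivial)
  rw [key, pv_chk_iff]
  simp only [List.not_mem_nil, false_or]
  constructor
  · rintro ⟨i, hi, h⟩
    rw [PySem.List.mem_pyRange_one] at hi
    simp only [PySem.List.len_eq] at hi
    obtain ⟨h0, hlt⟩ := hi
    lift i to Nat using h0 with k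
    refine ⟨k, by omega, ?_⟩
    rw [show ((k : Int) + 1) = ((k + 1 : Nat) : Int) by push_cast; ring] at h
    simp only [PySem.List.pyGetD_natCast] at h
    simp only [List.mem_cons, List.mem_nil_iff, or_false] at h
    omega
  · rintro ⟨k, hk, h⟩
    refine ⟨(k : Int), ?_, ?_⟩
    · rw [PySem.List.mem_pyRange_one]
      simp only [PySem.List.len_eq]
      omega
    · rw [show ((k : Int) + 1) = ((k + 1 : Nat) : Int) by push_cast; ring]
      simp only [PySem.List.pyGetD_natCast]
      simp only [List.mem_cons, List.mem_nil_iff, or_false]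
      omega

theorem pv_B_general (s : String) (h1 : (s == "1") = false) (h0 : (s == "0") = false) :
    percolation_alt s = (if pvChk (pvP (pvDigits s.toList) 0) then "No" else "Yes") := by
  unfold percolation_alt
  rw [if_neg (by simp [h1]), if_neg (by simp [h0])]
  simp only [pv_b_fold s.toList [] 0, List.nil_append, pv_zip_chk]

theorem pv_A_general (s : String) (h1 : (s == "1") = false) (h0 : (s == "0") = false) :
    percolation s = (if pvChk (pvP (pvDigits s.toList) 0) then "No" else "Yes") := by
  unfold percolation
  rw [if_neg (by simp [h1]), if_neg (by simp [h0])]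
  simp only [PySem.List.foldl_pyRange_zero_pyGetD s.toList ' '
      (fun l c => if c == '1' then l ++ [(1 : Int)]
                  else if c == '0' then l ++ [(0 : Int)] else l) ([] : List Int),
    pv_digits_fold s.toList [], List.nil_append]
  simp only [PySem.List.foldl_append_singleton_eq_map
      (fun i => PySem.List.slice (pvDigits s.toList) (some i) (some (i + 5)))
      (PySem.List.pyRange 0 (PySem.List.len (pvDigits s.toList)) 5) [], List.nil_append]
  simp only [PySem.List.pyRange_of_pos 0 (PySem.List.len (pvDigits s.toList))
      (by norm_num : (0:Int) < 5), List.map_map]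
  simp only [PySem.List.foldl_pyRange_zero_pyGetD _ ([] : List Int)
      (fun l row => (PySem.List.pyRange 0 (PySem.List.len row) 1).foldl
        (fun l x => if PySem.List.pyGetD row x 0 == 1 then l ++ [x] else l) l) ([] : List Int)]
  simp only [show (fun (l : List Int) (row : List Int) =>
        (PySem.List.pyRange 0 (PySem.List.len row) 1).foldl
          (fun l x => if PySem.List.pyGetD row x 0 == 1 then l ++ [x] else l) l)
      = (fun l row => l ++ pvQ row 0) from funext fun l => funext fun row => pv_inner row l]
  simp only [PySem.List.foldl_append_eq_flatMap (fun row => pvQ row 0), List.nil_append]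
  simp only [show ((fun i => PySem.List.slice (pvDigits s.toList) (some i) (some (i + 5)))
        ∘ (fun k : Nat => 0 + 5 * (k : Int)))
      = (fun k : Nat => ((pvDigits s.toList).drop (5 * k)).take 5) by
    funext k
    simp only [Function.comp_apply]
    rw [show (0 + 5 * (k : Int)) = ((5 * k : Nat) : Int) by push_cast; ring,
        show ((5 * k : Nat) : Int) + 5 = ((5 * k : Nat) : Int) + ((5 : Nat) : Int) by norm_num,
        PySem.List.slice_natCast_add]]
  simp only [show (if (0 : Int) < PySem.List.len (pvDigits s.toList)
        then ((PySem.List.len (pvDigits s.toList) - 0 + 5 - 1) / 5).toNat else 0)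
      = ((((pvDigits s.toList).length : Int) + 4) / 5).toNat by
    simp only [PySem.List.len_eq]
    split <;> omega]
  simp only [pv_main (pvDigits s.toList).length (pvDigits s.toList) rfl]
  simp only [pv_nolist_mem]

-- ===== VERDICT (by name: the statement is the Claim_ definition above) =====
theorem percolation_spec : Claim_equal_percolation := by
  intro s _
  unfold Spec_percolation
  by_cases h1 : s == "1"
  · have hs : s = "1" := by simpa using h1
    subst hs; decide
  · by_cases h0 : s == "0"
    · have hs : s = "0" := by simpa using h0
      subst hs; decide
    · rw [pv_A_general s (by simpa using h1) (by simpa using h0),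
          pv_B_general s (by simpa using h1) (by simpa using h0)]
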